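-- pv_equiv track=rewrite | github.com/YunfanZeng/COMP10001-Phazed | Phazed.py | set_checker
-- ===== SOURCE A (Python) =====
-- def set_checker(cards, set_dict, wild_cards, length):
--     ''' Takes a list of cards, a dictionary (sorted by suit or value), a int of
--     wild cards and length to check if cards belong in a suit or value set '''
--
--
--     if len(cards) == length:
--         for sets in set_dict.items():
--             # If all cards are in set
--             if len(sets[1]) == length:
--                 return True
--
--             # If there are atleast two cards and enough wildcards
--             elif len(sets[1]) >= 2:
--                 if len(sets[1]) + wild_cards >= length:
--                     return True
-- ===== SOURCE B (Python) =====
-- def set_checker(cards, set_dict, wild_cards, length):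
--     ''' Takes a list of cards, a dictionary (sorted by suit or value), a int of
--     wild cards and length to check if cards belong in a suit or value set '''
--     if len(cards) != length:
--         return None
--     sizes = [len(v) for v in set_dict.values()]
--     if any(s == length for s in sizes):
--         return True
--     big = [s for s in sizes if s >= 2]
--     if big and max(big) + wild_cards >= length:
--         return True
--     return None
-- ===== Notes on version B (the rewrite author's own statement) =====
-- stated objective: simpler
-- what changed: Replaces A's early-return loop over dict items with a flat size-list decomposition: compute sizes once, answer the exact-length case with any(), and the wildcard case with one max() over the sizes >= 2 (no per-item branching loop).
import Mathlib
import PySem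

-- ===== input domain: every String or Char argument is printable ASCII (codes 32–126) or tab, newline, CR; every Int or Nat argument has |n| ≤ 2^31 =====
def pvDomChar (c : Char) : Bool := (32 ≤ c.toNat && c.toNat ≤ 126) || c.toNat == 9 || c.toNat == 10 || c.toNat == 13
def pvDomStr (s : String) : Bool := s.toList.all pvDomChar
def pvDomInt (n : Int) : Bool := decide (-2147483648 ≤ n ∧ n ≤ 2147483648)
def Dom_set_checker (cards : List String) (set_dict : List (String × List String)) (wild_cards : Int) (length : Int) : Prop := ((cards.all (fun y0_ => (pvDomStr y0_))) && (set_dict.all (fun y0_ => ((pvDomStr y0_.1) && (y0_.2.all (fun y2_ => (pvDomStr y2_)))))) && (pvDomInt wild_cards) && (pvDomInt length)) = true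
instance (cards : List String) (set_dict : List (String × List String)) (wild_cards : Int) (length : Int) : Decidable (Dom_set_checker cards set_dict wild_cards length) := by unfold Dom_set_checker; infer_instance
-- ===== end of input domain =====

-- B replaces A's early-return loop over dict items by a flat decomposition over the list of
-- group sizes (any() for the exact-length case, one max() over sizes >= 2 for the wildcard case);
-- objective: simpler.

-- ===== PORT A =====
-- the 'for sets in set_dict.items(): … return True / fall through' loop
def setCheckerLoopA (items : List (String × List String)) (wild_cards length : Int) : Option Bool :=
  match items with
  | [] => none
  | sets :: rest =>
    if (sets.2.length : Int) = length then some true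
    else if (sets.2.length : Int) ≥ 2 then
      if (sets.2.length : Int) + wild_cards ≥ length then some true
      else setCheckerLoopA rest wild_cards length
    else setCheckerLoopA rest wild_cards length

def set_checker (cards : List String) (set_dict : List (String × List String)) (wild_cards : Int) (length : Int) : Option Bool :=
  if (cards.length : Int) = length then
    setCheckerLoopA (PySem.Dict.ofList set_dict).items wild_cards length
  else none

-- ===== PORT B =====
def set_checker_alt (cards : List String) (set_dict : List (String × List String)) (wild_cards : Int) (length : Int) : Option Bool :=
  if (cards.length : Int) ≠ length then none
  else
    let sizes : List Int := (PySem.Dict.ofList set_dict).values.map (fun v => (v.length : Int))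
    if sizes.any (fun s => s == length) then some true
    else
      let big := sizes.filter (fun s => 2 ≤ s)
      match PySem.List.max? big (fun s => s) with
      | some m => if length ≤ m + wild_cards then some true else none
      | none => none

-- ===== PRECONDITION & SPEC =====
def Spec_set_checker (cards : List String) (set_dict : List (String × List String)) (wild_cards : Int) (length : Int) (out : Option Bool) : Prop := out = set_checker_alt cards set_dict wild_cards length
instance (cards : List String) (set_dict : List (String × List String)) (wild_cards : Int) (length : Int) (out : Option Bool) : Decidable (Spec_set_checker cards set_dict wild_cards length out) := by unfold Spec_set_checker; infer_instance

-- ===== CLAIM (what is proved, stated in full; the proofs are below) =====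
def Claim_equal_set_checker : Prop := ∀ (cards : List String) (set_dict : List (String × List String)) (wild_cards : Int) (length : Int), Dom_set_checker cards set_dict wild_cards length → Spec_set_checker cards set_dict wild_cards length (set_checker cards set_dict wild_cards length)

-- ===== LEMMAS AND PROOFS =====

-- A's loop answers 'some true' exactly when some group has size == length, or size >= 2 with
-- enough wild cards; otherwise 'none'.
theorem loopA_eq_any (items : List (String × List String)) (w l : Int) :
    setCheckerLoopA items w l =
      (if items.any (fun p => ((p.2.length : Int) == l) ||
          ((2 ≤ (p.2.length : Int)) && (l ≤ (p.2.length : Int) + w))) then some true else none) := by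
  induction items with
  | nil => simp [setCheckerLoopA]
  | cons sets rest ih =>
    simp only [setCheckerLoopA, List.any_cons, ih, Bool.or_eq_true, Bool.and_eq_true,
      beq_iff_eq, decide_eq_true_eq]
    split_ifs <;> first | rfl | tauto

-- the 'big nonempty and max(big)+wild >= length' test is an existential over big
theorem max?_branch (big : List Int) (w l : Int) :
    (match PySem.List.max? big (fun s => s) with
      | some m => if l ≤ m + w then some true else none
      | none => none) =
      (if big.any (fun s => l ≤ s + w) then some true else none) := by
  cases hm : PySem.List.max? big (fun s => s) with
  | none =>
    have : big = [] := (PySem.List.max?_eq_none_iff big (fun s => s)).mp hm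
    simp [this]
  | some m =>
    have hmem : m ∈ big := PySem.List.max?_mem hm
    have hle : ∀ x ∈ big, x ≤ m := fun x hx => PySem.List.max?_isMax hm x hx
    by_cases h : l ≤ m + w
    · have : big.any (fun s => l ≤ s + w) = true := by
        simp only [List.any_eq_true]
        exact ⟨m, hmem, by simpa using h⟩
      simp [h, this]
    · have : big.any (fun s => l ≤ s + w) = false := by
        simp only [List.any_eq_false]
        intro x hx
        simp only [decide_eq_true_eq]
        intro hc
        exact h (le_trans hc (by have := hle x hx; omega))
      simp [h, this]

theorem any_or_split {α : Type} (xs : List α) (p q : α → Bool) :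
    xs.any (fun a => p a || q a) = (xs.any p || xs.any q) := by
  induction xs with
  | nil => simp
  | cons a t ih =>
    simp only [List.any_cons, ih]
    cases p a <;> cases q a <;> simp

-- ===== VERDICT (by name: the statement is the Claim_ definition above) =====
theorem set_checker_spec : Claim_equal_set_checker := by
  intro cards set_dict w l _
  unfold Spec_set_checker set_checker set_checker_alt
  by_cases hc : (cards.length : Int) = l
  · simp only [hc, if_pos, ne_eq, not_true_eq_false, if_false]
    rw [loopA_eq_any]
    have hvals : (PySem.Dict.ofList set_dict).values =
        (PySem.Dict.ofList set_dict).items.map (·.2) := rfl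
    rw [hvals, max?_branch]
    simp only [List.any_filter, List.map_map, List.any_map, Function.comp_def, any_or_split]
    cases hE : (PySem.Dict.ofList set_dict).items.any
        (fun p => ((p.2.length : Int) == l)) <;>
      cases hG : (PySem.Dict.ofList set_dict).items.any
          (fun p => (decide (2 ≤ (p.2.length : Int)) && decide (l ≤ (p.2.length : Int) + w))) <;>
        simp_all
  · simp [hc]
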